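-- pv_equiv track=rewrite | github.com/C3EQUALZz/DSTU_VKB | programming_methods/laboratories/1/7.py | calculate_exit_times
-- ===== SOURCE A (Python) =====
-- from typing import List, Tuple
--
-- def calculate_exit_times(arrival_times: List[Tuple[int, ...]]) -> List[Tuple[int, int]]:
--     workers_time: List[int] = [0, 0, 0]  # Время, когда каждый из трех мастеров свободен
--     exit_times: List[Tuple[int, int]] = []  # Список для хранения времени выхода клиентов
--
--     for hours, minutes in arrival_times:
--         arrival_minutes = hours * 60 + minutes  # Преобразуем время прихода в минуты
--         # Находим мастера, который свободен раньше всего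
--         next_worker_index = workers_time.index(min(workers_time))
--
--         # Если мастер свободен до прихода клиента, обновляем его время
--         if workers_time[next_worker_index] <= arrival_minutes:
--             workers_time[next_worker_index] = arrival_minutes + 30
--         else:
--             workers_time[next_worker_index] += 30  # Мастер начинает работать сразу после завершения
--
--         # Сохраняем время выхода клиента в формате (часы, минуты)
--         exit_time = workers_time[next_worker_index]
--         exit_times.append((exit_time // 60, exit_time % 60))
--
--     return exit_times
-- ===== SOURCE B (Python) =====
-- import heapq
-- from typing import List, Tuple
--
-- def calculate_exit_times(arrival_times: List[Tuple[int, ...]]) -> List[Tuple[int, int]]: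
--     # min-heap of (free_time, worker_index): pop the earliest-free master
--     # (ties broken by lowest index, as the tuple order guarantees)
--     heap = [(0, 0), (0, 1), (0, 2)]
--     exit_times: List[Tuple[int, int]] = []
--     for hours, minutes in arrival_times:
--         arrival = hours * 60 + minutes
--         free, idx = heapq.heappop(heap)
--         t = max(free, arrival) + 30
--         exit_times.append((t // 60, t % 60))
--         heapq.heappush(heap, (t, idx))
--     return exit_times
-- ===== Notes on version B (the rewrite author's own statement) =====
-- stated objective: idiomatic
-- what changed: Replaces A's fixed three-slot workers list scanned with min()/.index() and updated in place by a heapq min-heap of (free_time, worker_index) pairs popped and pushed per client; the tuple order reproduces A's lowest-index tie-break.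
import Mathlib
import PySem

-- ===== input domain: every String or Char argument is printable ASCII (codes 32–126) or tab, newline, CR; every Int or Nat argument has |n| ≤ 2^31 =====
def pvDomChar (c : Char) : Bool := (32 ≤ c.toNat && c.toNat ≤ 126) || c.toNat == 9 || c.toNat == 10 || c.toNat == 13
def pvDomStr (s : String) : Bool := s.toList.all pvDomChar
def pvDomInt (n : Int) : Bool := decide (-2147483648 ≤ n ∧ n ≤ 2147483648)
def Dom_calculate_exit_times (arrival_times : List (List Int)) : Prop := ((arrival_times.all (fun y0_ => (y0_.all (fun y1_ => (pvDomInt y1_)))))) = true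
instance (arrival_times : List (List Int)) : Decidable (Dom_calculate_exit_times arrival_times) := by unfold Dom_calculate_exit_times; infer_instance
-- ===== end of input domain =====

-- B replaces A's fixed three-slot list scanned with min/.index by a min-heap of
-- (free_time, worker_index) pairs popped and pushed per client (objective: idiomatic).

-- ===== PORT A =====
-- the loop body of A, structural recursion over the client list; state = workers_time
def pvALoop (w : List Int) (rows : List (List Int)) : List (Int × Int) :=
  match rows with
  | [] => []
  | row :: rs =>
    match row with
    | [hours, minutes] =>
      let arrival := hours * 60 + minutes
      -- workers_time.index(min(workers_time)); w is always the 3-element list, so min?/index? are some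
      let m := (PySem.List.min? w (fun x => x)).getD 0
      let i := ((PySem.List.index? w m).getD 0 : Nat)
      let cur := w.getD i 0
      let w' := if cur ≤ arrival then w.set i (arrival + 30) else w.set i (cur + 30)
      let t := w'.getD i 0
      (PySem.Int.floordiv t 60, PySem.Int.mod t 60) :: pvALoop w' rs
    | _ => []  -- Python raises ValueError unpacking a row of length ≠ 2 (excluded by Pre_)

def calculate_exit_times (arrival_times : List (List Int)) : List (Int × Int) :=
  pvALoop [0, 0, 0] arrival_times

-- ===== PORT B =====
-- lexicographic min of two (free_time, index) pairs — Python's tuple order used by heapq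
def pvPmin (p q : Int × Int) : Int × Int :=
  if p.1 < q.1 ∨ (p.1 = q.1 ∧ p.2 ≤ q.2) then p else q

-- heapq.heappop: remove and return the smallest element (stdlib call, ported by its contract)
def pvHeapPop (h : List (Int × Int)) : (Int × Int) × List (Int × Int) :=
  match h with
  | [] => ((0, 0), [])  -- unreachable: the heap always holds the 3 masters
  | x :: xs =>
    let m := xs.foldl pvPmin x
    (m, (x :: xs).erase m)

-- heapq.heappush: add an element
def pvHeapPush (h : List (Int × Int)) (p : Int × Int) : List (Int × Int) := h ++ [p]

def pvBLoop (h : List (Int × Int)) (rows : List (List Int)) : List (Int × Int) :=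
  match rows with
  | [] => []
  | row :: rs =>
    match row with
    | [hours, minutes] =>
      let arrival := hours * 60 + minutes
      let pop := pvHeapPop h
      let t := max pop.1.1 arrival + 30
      (PySem.Int.floordiv t 60, PySem.Int.mod t 60) :: pvBLoop (pvHeapPush pop.2 (t, pop.1.2)) rs
    | _ => []  -- Python raises ValueError unpacking a row of length ≠ 2 (excluded by Pre_)

def calculate_exit_times_alt (arrival_times : List (List Int)) : List (Int × Int) :=
  pvBLoop [(0, 0), (0, 1), (0, 2)] arrival_times

-- ===== PRECONDITION & SPEC =====
-- Pre_ excludes rows of length ≠ 2, on which both Pythons raise ValueError while unpacking.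
def Pre_calculate_exit_times (arrival_times : List (List Int)) : Prop :=
  ∀ r ∈ arrival_times, r.length = 2
instance (arrival_times : List (List Int)) : Decidable (Pre_calculate_exit_times arrival_times) := by
  unfold Pre_calculate_exit_times; infer_instance

def pvWitness_calculate_exit_times : List (List Int) := [[9, 0], [9, 10], [9, 15], [9, 20]]

def Spec_calculate_exit_times (arrival_times : List (List Int)) (out : List (Int × Int)) : Prop := out = calculate_exit_times_alt arrival_times
instance (arrival_times : List (List Int)) (out : List (Int × Int)) : Decidable (Spec_calculate_exit_times arrival_times out) := by unfold Spec_calculate_exit_times; infer_instance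

-- ===== CLAIM (what is proved, stated in full; the proofs are below) =====
def Claim_equal_calculate_exit_times : Prop := ∀ (arrival_times : List (List Int)), Dom_calculate_exit_times arrival_times → Pre_calculate_exit_times arrival_times → Spec_calculate_exit_times arrival_times (calculate_exit_times arrival_times)

-- ===== LEMMAS AND PROOFS =====

-- the heap is always an arrangement of the three workers' pairs; a b c are A's workers_time
def pvInv (a b c : Int) (h : List (Int × Int)) : Prop :=
  h = [(a,0),(b,1),(c,2)] ∨ h = [(a,0),(c,2),(b,1)] ∨ h = [(b,1),(a,0),(c,2)] ∨
  h = [(b,1),(c,2),(a,0)] ∨ h = [(c,2),(a,0),(b,1)] ∨ h = [(c,2),(b,1),(a,0)]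

-- which pair A's min/.index selection picks: smallest free time, lowest index on ties
def pvSel (a b c : Int) : Int × Int :=
  if a ≤ b ∧ a ≤ c then (a, 0) else if b ≤ c then (b, 1) else (c, 2)

-- A's updated workers_time after serving at minute t
def pvUpd (a b c t : Int) : List Int :=
  if a ≤ b ∧ a ≤ c then [t, b, c] else if b ≤ c then [a, t, c] else [a, b, t]

lemma pvA_min (a b c : Int) :
    (PySem.List.min? [a, b, c] (fun x => x)).getD 0 = min (min a b) c := by
  rw [PySem.List.min?_id_cons]; simp [List.foldl]

lemma pvA_idx0 (a b c : Int) (hab : a ≤ b) (hac : a ≤ c) :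
    ((PySem.List.index? [a, b, c] (min (min a b) c)).getD 0 : Nat) = 0 := by
  have h : min (min a b) c = a := by omega
  rw [h]; simp [PySem.List.index?_eq_idxOf?, List.idxOf?, List.findIdx?_cons]

lemma pvA_idx1 (a b c : Int) (hba : b < a) (hbc : b ≤ c) :
    ((PySem.List.index? [a, b, c] (min (min a b) c)).getD 0 : Nat) = 1 := by
  have h : min (min a b) c = b := by omega
  rw [h]; simp [PySem.List.index?_eq_idxOf?, List.idxOf?, List.findIdx?_cons, hba.ne']

lemma pvA_idx2 (a b c : Int) (hca : c < a) (hcb : c < b) :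
    ((PySem.List.index? [a, b, c] (min (min a b) c)).getD 0 : Nat) = 2 := by
  have h : min (min a b) c = c := by omega
  rw [h]; simp [PySem.List.index?_eq_idxOf?, List.idxOf?, List.findIdx?_cons, hca.ne', hcb.ne']

lemma pvA_step (a b c hh mm : Int) (rs : List (List Int)) :
    pvALoop [a, b, c] ([hh, mm] :: rs) =
      (PySem.Int.floordiv (max (pvSel a b c).1 (hh * 60 + mm) + 30) 60,
       PySem.Int.mod (max (pvSel a b c).1 (hh * 60 + mm) + 30) 60)
        :: pvALoop (pvUpd a b c (max (pvSel a b c).1 (hh * 60 + mm) + 30)) rs := by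
  show (let arrival := hh * 60 + mm
        let m := (PySem.List.min? [a,b,c] (fun x => x)).getD 0
        let i := ((PySem.List.index? [a,b,c] m).getD 0 : Nat)
        let cur := [a,b,c].getD i 0
        let w' := if cur ≤ arrival then [a,b,c].set i (arrival + 30) else [a,b,c].set i (cur + 30)
        let t := w'.getD i 0
        (PySem.Int.floordiv t 60, PySem.Int.mod t 60) :: pvALoop w' rs) = _
  simp only [pvA_min]
  by_cases h1 : a ≤ b ∧ a ≤ c
  · simp only [pvA_idx0 a b c h1.1 h1.2, pvSel, pvUpd, if_pos h1]
    by_cases hc : a ≤ hh * 60 + mm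
    · rw [show max a (hh * 60 + mm) = hh * 60 + mm by omega]
      simp [List.getD, List.set, hc]
    · rw [show max a (hh * 60 + mm) = a by omega]
      simp [List.getD, List.set, hc]
  · rw [not_and_or, not_le, not_le] at h1
    have hna : ¬ (a ≤ b ∧ a ≤ c) := by omega
    by_cases h2 : b ≤ c
    · have hba : b < a := by omega
      simp only [pvA_idx1 a b c hba h2, pvSel, pvUpd, if_neg hna, if_pos h2]
      by_cases hc : b ≤ hh * 60 + mm
      · rw [show max b (hh * 60 + mm) = hh * 60 + mm by omega]
        simp [List.getD, List.set, hc]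
      · rw [show max b (hh * 60 + mm) = b by omega]
        simp [List.getD, List.set, hc]
    · have hca : c < a := by omega
      have hcb : c < b := by omega
      simp only [pvA_idx2 a b c hca hcb, pvSel, pvUpd, if_neg hna, if_neg h2]
      by_cases hc : c ≤ hh * 60 + mm
      · rw [show max c (hh * 60 + mm) = hh * 60 + mm by omega]
        simp [List.getD, List.set, hc]
      · rw [show max c (hh * 60 + mm) = c by omega]
        simp [List.getD, List.set, hc]

-- the lexicographic minimum of the three workers' pairs, for every arrangement, is pvSel
lemma pvCanon1 (a b c : Int) : pvPmin (pvPmin (a,0) (b,1)) (c,2) = pvSel a b c := by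
  simp only [pvPmin, pvSel]; split_ifs <;> simp_all <;> omega
lemma pvCanon2 (a b c : Int) : pvPmin (pvPmin (a,0) (c,2)) (b,1) = pvSel a b c := by
  simp only [pvPmin, pvSel]; split_ifs <;> simp_all <;> omega
lemma pvCanon3 (a b c : Int) : pvPmin (pvPmin (b,1) (a,0)) (c,2) = pvSel a b c := by
  simp only [pvPmin, pvSel]; split_ifs <;> simp_all <;> omega
lemma pvCanon4 (a b c : Int) : pvPmin (pvPmin (b,1) (c,2)) (a,0) = pvSel a b c := by
  simp only [pvPmin, pvSel]; split_ifs <;> simp_all <;> omega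
lemma pvCanon5 (a b c : Int) : pvPmin (pvPmin (c,2) (a,0)) (b,1) = pvSel a b c := by
  simp only [pvPmin, pvSel]; split_ifs <;> simp_all <;> omega
lemma pvCanon6 (a b c : Int) : pvPmin (pvPmin (c,2) (b,1)) (a,0) = pvSel a b c := by
  simp only [pvPmin, pvSel]; split_ifs <;> simp_all <;> omega

lemma pvB_step (x y z : Int × Int) (hh mm : Int) (rs : List (List Int)) :
    pvBLoop [x, y, z] ([hh, mm] :: rs) =
      (PySem.Int.floordiv (max (pvPmin (pvPmin x y) z).1 (hh * 60 + mm) + 30) 60,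
       PySem.Int.mod (max (pvPmin (pvPmin x y) z).1 (hh * 60 + mm) + 30) 60)
        :: pvBLoop (([x, y, z].erase (pvPmin (pvPmin x y) z)) ++
            [(max (pvPmin (pvPmin x y) z).1 (hh * 60 + mm) + 30, (pvPmin (pvPmin x y) z).2)]) rs := rfl

lemma pvStep (a b c hh mm : Int) (rs : List (List Int)) (h : List (Int × Int))
    (hinv : pvInv a b c h)
    (ih : ∀ (a b c : Int) (h : List (Int × Int)), pvInv a b c h →
      pvALoop [a, b, c] rs = pvBLoop h rs) :
    pvALoop [a, b, c] ([hh, mm] :: rs) = pvBLoop h ([hh, mm] :: rs) := by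
  rw [pvA_step]
  rcases hinv with rfl|rfl|rfl|rfl|rfl|rfl
  · rw [pvB_step, pvCanon1]
    by_cases h1 : a ≤ b ∧ a ≤ c
    · simp only [pvSel, pvUpd, if_pos h1]
      norm_num
      exact ih _ _ _ _ (by unfold pvInv; norm_num)
    · by_cases h2 : b ≤ c
      · simp only [pvSel, pvUpd, if_neg h1, if_pos h2]
        norm_num
        exact ih _ _ _ _ (by unfold pvInv; norm_num)
      · simp only [pvSel, pvUpd, if_neg h1, if_neg h2]
        norm_num
        exact ih _ _ _ _ (by unfold pvInv; norm_num)
  · rw [pvB_step, pvCanon2]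
    by_cases h1 : a ≤ b ∧ a ≤ c
    · simp only [pvSel, pvUpd, if_pos h1]
      norm_num
      exact ih _ _ _ _ (by unfold pvInv; norm_num)
    · by_cases h2 : b ≤ c
      · simp only [pvSel, pvUpd, if_neg h1, if_pos h2]
        norm_num
        exact ih _ _ _ _ (by unfold pvInv; norm_num)
      · simp only [pvSel, pvUpd, if_neg h1, if_neg h2]
        norm_num
        exact ih _ _ _ _ (by unfold pvInv; norm_num)
  · rw [pvB_step, pvCanon3]
    by_cases h1 : a ≤ b ∧ a ≤ c
    · simp only [pvSel, pvUpd, if_pos h1]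
      norm_num
      exact ih _ _ _ _ (by unfold pvInv; norm_num)
    · by_cases h2 : b ≤ c
      · simp only [pvSel, pvUpd, if_neg h1, if_pos h2]
        norm_num
        exact ih _ _ _ _ (by unfold pvInv; norm_num)
      · simp only [pvSel, pvUpd, if_neg h1, if_neg h2]
        norm_num
        exact ih _ _ _ _ (by unfold pvInv; norm_num)
  · rw [pvB_step, pvCanon4]
    by_cases h1 : a ≤ b ∧ a ≤ c
    · simp only [pvSel, pvUpd, if_pos h1]
      norm_num
      exact ih _ _ _ _ (by unfold pvInv; norm_num)
    · by_cases h2 : b ≤ c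
      · simp only [pvSel, pvUpd, if_neg h1, if_pos h2]
        norm_num
        exact ih _ _ _ _ (by unfold pvInv; norm_num)
      · simp only [pvSel, pvUpd, if_neg h1, if_neg h2]
        norm_num
        exact ih _ _ _ _ (by unfold pvInv; norm_num)
  · rw [pvB_step, pvCanon5]
    by_cases h1 : a ≤ b ∧ a ≤ c
    · simp only [pvSel, pvUpd, if_pos h1]
      norm_num
      exact ih _ _ _ _ (by unfold pvInv; norm_num)
    · by_cases h2 : b ≤ c
      · simp only [pvSel, pvUpd, if_neg h1, if_pos h2]
        norm_num
        exact ih _ _ _ _ (by unfold pvInv; norm_num)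
      · simp only [pvSel, pvUpd, if_neg h1, if_neg h2]
        norm_num
        exact ih _ _ _ _ (by unfold pvInv; norm_num)
  · rw [pvB_step, pvCanon6]
    by_cases h1 : a ≤ b ∧ a ≤ c
    · simp only [pvSel, pvUpd, if_pos h1]
      norm_num
      exact ih _ _ _ _ (by unfold pvInv; norm_num)
    · by_cases h2 : b ≤ c
      · simp only [pvSel, pvUpd, if_neg h1, if_pos h2]
        norm_num
        exact ih _ _ _ _ (by unfold pvInv; norm_num)
      · simp only [pvSel, pvUpd, if_neg h1, if_neg h2]
        norm_num
        exact ih _ _ _ _ (by unfold pvInv; norm_num)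

theorem pvLoop_eq : ∀ (rows : List (List Int)) (a b c : Int) (h : List (Int × Int)),
    (∀ r ∈ rows, r.length = 2) → pvInv a b c h → pvALoop [a, b, c] rows = pvBLoop h rows := by
  intro rows
  induction rows with
  | nil => intro a b c h _ hinv; rcases hinv with rfl|rfl|rfl|rfl|rfl|rfl <;> rfl
  | cons row rs ih =>
    intro a b c h hlen hinv
    obtain ⟨hh, mm, rfl⟩ : ∃ x y, row = [x, y] := by
      have := hlen row (by simp)
      match row, this with
      | [x, y], _ => exact ⟨x, y, rfl⟩
    have hlen' : ∀ r ∈ rs, r.length = 2 := fun r hr => hlen r (by simp [hr])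
    exact pvStep a b c hh mm rs h hinv (fun a b c h hi => ih a b c h hlen' hi)

-- ===== VERDICT (by name: the statement is the Claim_ definition above) =====
theorem calculate_exit_times_spec : Claim_equal_calculate_exit_times := by
  intro ats _ hpre
  unfold Spec_calculate_exit_times calculate_exit_times calculate_exit_times_alt
  exact pvLoop_eq ats 0 0 0 _ hpre (Or.inl rfl)
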